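-- pv_equiv track=rewrite | github.com/JofredG/TIP102 | u3-s2-v1.py | build_skyscrapers
-- ===== SOURCE A (Python) =====
-- def build_skyscrapers(floors):
--     s = []
--     res = 0
--     for floor in floors:
--         if s:
--             if s[-1] <= floor:
--                 s.append(floor)
--             else:
--                 res = res + 1
--                 while s:
--                     s.pop()
--                 s.append(floor)
--
--         else:
--             s.append(floor)
--     #if s:
--     #    res += 1
--     return res + 1
-- ===== SOURCE B (Python) =====
-- def build_skyscrapers(floors):
--     return 1 + sum(1 for prev, cur in zip(floors, floors[1:]) if cur < prev)
-- ===== Notes on version B (the rewrite author's own statement) =====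
-- stated objective: simpler
-- what changed: Replaces the stack with a pop-all loop by a single pass over adjacent pairs counting strict descents, returning that count plus one.
import Mathlib
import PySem

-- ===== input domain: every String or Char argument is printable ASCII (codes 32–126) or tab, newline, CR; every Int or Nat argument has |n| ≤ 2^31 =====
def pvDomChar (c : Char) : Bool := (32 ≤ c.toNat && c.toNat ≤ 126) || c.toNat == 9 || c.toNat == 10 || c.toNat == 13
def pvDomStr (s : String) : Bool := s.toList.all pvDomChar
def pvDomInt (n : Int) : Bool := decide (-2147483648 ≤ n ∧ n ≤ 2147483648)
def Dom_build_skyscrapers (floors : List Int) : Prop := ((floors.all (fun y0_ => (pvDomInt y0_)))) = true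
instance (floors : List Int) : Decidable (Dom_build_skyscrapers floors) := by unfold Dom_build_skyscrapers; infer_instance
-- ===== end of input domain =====

-- B drops A's stack/pop machinery: one pass over adjacent pairs counting strict descents, plus one.
-- ===== PORT A =====
-- step of A's for-loop over state (s, res); 'while s: s.pop(); s.append(floor)' leaves s = [floor]
def build_skyscrapers_step (p : List Int × Int) (floor : Int) : List Int × Int :=
  let s := p.1
  let res := p.2
  if s ≠ [] then
    if s.getLast! ≤ floor then (s ++ [floor], res)
    else ([floor], res + 1)
  else (s ++ [floor], res)

def build_skyscrapers (floors : List Int) : Int :=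
  let st := floors.foldl build_skyscrapers_step ([], 0)
  st.2 + 1

-- ===== PORT B =====
def build_skyscrapers_alt (floors : List Int) : Int :=
  1 + (floors.zip floors.tail).foldl
        (fun acc p => if p.2 < p.1 then acc + 1 else acc) 0

-- ===== PRECONDITION & SPEC =====
def Spec_build_skyscrapers (floors : List Int) (out : Int) : Prop := out = build_skyscrapers_alt floors
instance (floors : List Int) (out : Int) : Decidable (Spec_build_skyscrapers floors out) := by unfold Spec_build_skyscrapers; infer_instance

-- ===== CLAIM (what is proved, stated in full; the proofs are below) =====
def Claim_equal_build_skyscrapers : Prop := ∀ (floors : List Int), Dom_build_skyscrapers floors → Spec_build_skyscrapers floors (build_skyscrapers floors)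

-- ===== LEMMAS AND PROOFS =====

-- number of strict descents in x :: rest
def dcount (x : Int) : List Int → Int
  | [] => 0
  | y :: t => (if y < x then 1 else 0) + dcount y t

theorem getLast!_concat_eq (l : List Int) (a : Int) : (l ++ [a]).getLast! = a := by
  induction l with
  | nil => rfl
  | cons x t ih =>
    cases t with
    | nil => rfl
    | cons y u => simpa [List.getLast!, List.getLast] using ih

theorem loopA (rest : List Int) : ∀ (s : List Int) (res : Int), s ≠ [] →
    (List.foldl build_skyscrapers_step (s, res) rest).2 = res + dcount s.getLast! rest := by
  induction rest with
  | nil => intro s res hs; simp [dcount]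
  | cons y t ih =>
    intro s res hs
    simp only [List.foldl_cons, build_skyscrapers_step, dcount]
    by_cases h : s.getLast! ≤ y
    · have hne : s ++ [y] ≠ [] := by simp
      rw [if_pos hs, if_pos h, ih _ _ hne, getLast!_concat_eq, if_neg (by omega)]
      omega
    · have hne : ([y] : List Int) ≠ [] := by simp
      rw [if_pos hs, if_neg h, ih _ _ hne]
      have hy : y < s.getLast! := by omega
      have : ([y] : List Int).getLast! = y := rfl
      rw [this, if_pos hy]
      omega

theorem loopB (rest : List Int) : ∀ (x : Int) (acc : Int),
    (List.foldl (fun acc p => if p.2 < p.1 then acc + 1 else acc) acc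
      ((x :: rest).zip rest)) = acc + dcount x rest := by
  induction rest with
  | nil => intro x acc; simp [dcount]
  | cons y t ih =>
    intro x acc
    simp only [List.zip_cons_cons, List.foldl_cons, dcount]
    rw [ih]
    by_cases h : y < x <;> simp [h] <;> omega -- split on the descent test

-- ===== VERDICT (by name: the statement is the Claim_ definition above) =====
theorem build_skyscrapers_spec : Claim_equal_build_skyscrapers := by
  intro floors _
  unfold Spec_build_skyscrapers build_skyscrapers build_skyscrapers_alt
  cases floors with
  | nil => rfl
  | cons x rest =>
    simp only [List.foldl_cons, build_skyscrapers_step, List.tail_cons]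
    rw [if_neg (by simp), show ([] ++ [x] : List Int) = [x] from rfl, loopA rest [x] 0 (by simp), loopB rest x 0]
    have : ([x] : List Int).getLast! = x := rfl
    rw [this]
    omega
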